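-- pv_equiv track=rewrite | github.com/MohamedAsifS/my_LeetCode | 2395-Find Subarrays With Equal Sum/code.py | findSubarrays
-- ===== SOURCE A (Python) =====
-- from typing import List
--
-- def findSubarrays(nums: List[int]) -> bool:
--
--     check=set()
--
--     for i in range(1,len(nums)):
--         s=nums[i-1]+nums[i]
--         if s in check:
--             return True
--         check.add(s)
--     return False
-- ===== SOURCE B (Python) =====
-- def findSubarrays(nums):
--     sums = sorted(nums[i - 1] + nums[i] for i in range(1, len(nums)))
--     return any(sums[j] == sums[j + 1] for j in range(len(sums) - 1))
-- ===== Notes on version B (the rewrite author's own statement) =====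
-- stated objective: alternative
-- what changed: Replaces A's streaming hash-set membership loop by a sort-then-scan duplicate detection: build all adjacent-pair sums, sort them, and report whether any two neighbours in the sorted list are equal (no set at all).
import Mathlib
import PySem

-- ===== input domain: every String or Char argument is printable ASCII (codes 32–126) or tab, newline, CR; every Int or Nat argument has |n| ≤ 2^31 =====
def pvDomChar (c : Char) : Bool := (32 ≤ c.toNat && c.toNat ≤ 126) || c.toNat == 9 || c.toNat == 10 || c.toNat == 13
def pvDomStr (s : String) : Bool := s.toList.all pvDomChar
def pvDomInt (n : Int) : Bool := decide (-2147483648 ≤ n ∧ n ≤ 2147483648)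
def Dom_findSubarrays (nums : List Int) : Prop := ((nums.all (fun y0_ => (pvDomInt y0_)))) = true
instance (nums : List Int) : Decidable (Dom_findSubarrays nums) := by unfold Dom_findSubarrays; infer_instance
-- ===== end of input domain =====

-- B drops A's streaming set-membership loop: it sorts the adjacent-pair sums and scans
-- the sorted list for two equal neighbours; same results by a different algorithm.

-- ===== PORT A =====
-- A's loop 'for i in range(1, len(nums))' reads nums[i-1] and nums[i]: the recursion carries
-- nums[i-1] as 'prev' and walks the remaining elements, exact on every input.
def findSubarraysGo (check : PySem.Set Int) (prev : Int) : List Int → Bool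
  | [] => false
  | x :: rest =>
    let s := prev + x
    if check.contains s then true
    else findSubarraysGo (check.add s) x rest

def findSubarrays (nums : List Int) : Bool :=
  match nums with
  | [] => false
  | a :: rest => findSubarraysGo PySem.Set.empty a rest

-- ===== PORT B =====
-- 'any(sums[j] == sums[j+1] for j in range(len(sums)-1))': scan adjacent positions.
def hasAdjDup : List Int → Bool
  | a :: b :: rest => a == b || hasAdjDup (b :: rest)
  | _ => false

def findSubarrays_alt (nums : List Int) : Bool :=
  let sums := PySem.List.sorted (List.zipWith (· + ·) nums nums.tail) (fun x => x) false
  hasAdjDup sums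

-- ===== PRECONDITION & SPEC =====
def Spec_findSubarrays (nums : List Int) (out : Bool) : Prop := out = findSubarrays_alt nums
instance (nums : List Int) (out : Bool) : Decidable (Spec_findSubarrays nums out) := by unfold Spec_findSubarrays; infer_instance

-- ===== CLAIM (what is proved, stated in full; the proofs are below) =====
def Claim_equal_findSubarrays : Prop := ∀ (nums : List Int), Dom_findSubarrays nums → Spec_findSubarrays nums (findSubarrays nums)

-- ===== LEMMAS AND PROOFS =====

theorem set_add_nodup (s : PySem.Set Int) (x : Int) (h : s.Nodup) :
    (PySem.Set.add s x).Nodup := by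
  rw [PySem.Set.add_eq_ite]
  split
  · exact h
  · next hc =>
    have hx : x ∉ s := by
      intro hm
      exact hc (by simp [hm])
    simp [List.nodup_append, h]
    intro a ha rfl; exact hx ha

-- A's loop returns True exactly when some sum already seen (in 'check' or earlier in the stream) recurs.
theorem findSubarraysGo_iff (xs : List Int) :
    ∀ (prev : Int) (check : PySem.Set Int), check.Nodup →
    (findSubarraysGo check prev xs = true ↔
      ¬ (check ++ List.zipWith (· + ·) (prev :: xs) xs).Nodup) := by
  induction xs with
  | nil => intro prev check h; simpa [findSubarraysGo] using h
  | cons x rest ih =>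
    intro prev check h
    simp only [findSubarraysGo, List.zipWith_cons_cons]
    by_cases hm : (prev + x) ∈ check
    · have hc : check.contains (prev + x) = true := by simp [hm]
      rw [if_pos hc]
      simp only [true_iff]
      intro hnd
      rw [List.nodup_append] at hnd
      exact hnd.2.2 _ hm _ (by simp) rfl
    · have hc : ¬ check.contains (prev + x) = true := by simp [PySem.Set.contains, hm]
      rw [if_neg hc]
      have hadd : PySem.Set.add check (prev + x) = check ++ [prev + x] := by
        rw [PySem.Set.add_eq_ite, if_neg hm]
      rw [ih x _ (set_add_nodup _ _ h), hadd]
      have : (check ++ [prev + x]) ++ List.zipWith (· + ·) (x :: rest) rest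
           = check ++ (prev + x) :: List.zipWith (· + ·) (x :: rest) rest := by
        simp
      rw [this]

-- on a ≤-sorted list, an adjacent duplicate is the same as any duplicate
theorem hasAdjDup_iff (L : List Int) (hs : L.Pairwise (· ≤ ·)) :
    (hasAdjDup L = true ↔ ¬ L.Nodup) := by
  induction L with
  | nil => simp [hasAdjDup]
  | cons a t ih =>
    cases t with
    | nil => simp [hasAdjDup]
    | cons b rest =>
      have hab : a ≤ b := (List.pairwise_cons.mp hs).1 b (by simp)
      have ht : (b :: rest).Pairwise (· ≤ ·) := (List.pairwise_cons.mp hs).2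
      by_cases heq : a = b
      · subst heq
        simp [hasAdjDup, List.nodup_cons]
      · have hne : (a == b) = false := by simp [heq]
        have hnm : a ∉ b :: rest := by
          intro hmem
          rw [List.mem_cons] at hmem
          rcases hmem with hmem | hmem
          · exact heq hmem
          · have hba : b ≤ a := by
              have := (List.pairwise_cons.mp ht).1 a hmem
              exact this
            have : a = b := le_antisymm hab hba
            exact heq this
        have : hasAdjDup (a :: b :: rest) = hasAdjDup (b :: rest) := by
          simp [hasAdjDup, hne]
        rw [this, ih ht]
        simp [List.nodup_cons, hnm]

theorem findSubarrays_eq_nodup (nums : List Int) :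
    findSubarrays nums = decide (¬ (List.zipWith (· + ·) nums nums.tail).Nodup) := by
  cases nums with
  | nil => simp [findSubarrays]
  | cons a rest =>
    have h := findSubarraysGo_iff rest a PySem.Set.empty (by simp [PySem.Set.empty])
    simp only [PySem.Set.empty, List.nil_append] at h
    rw [Bool.eq_iff_iff, decide_eq_true_iff]
    simpa using h

theorem findSubarrays_alt_eq_nodup (nums : List Int) :
    findSubarrays_alt nums = decide (¬ (List.zipWith (· + ·) nums nums.tail).Nodup) := by
  unfold findSubarrays_alt
  rw [Bool.eq_iff_iff, decide_eq_true_iff]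
  rw [hasAdjDup_iff _ (PySem.List.sorted_pairwise _ _)]
  constructor
  · intro h hnd
    exact h ((PySem.List.sorted_perm _ _ _).nodup_iff.mpr hnd)
  · intro h hnd
    exact h ((PySem.List.sorted_perm _ _ _).nodup_iff.mp hnd)

-- ===== VERDICT (by name: the statement is the Claim_ definition above) =====
theorem findSubarrays_spec : Claim_equal_findSubarrays := by
  intro nums _
  unfold Spec_findSubarrays
  rw [findSubarrays_eq_nodup, findSubarrays_alt_eq_nodup]
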